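-- pv_equiv track=rewrite | github.com/hermetoproject/hermeto | tests/integration/container_engine.py | _filter_entrypoint_flags
-- ===== SOURCE A (Python) =====
-- from typing import Any, Optional, Union
--
-- def _filter_entrypoint_flags(
--     flags: Optional[list[str]]
-- ) -> tuple[list[str], Optional[str]]:
--     """Remove and return any entrypoint flags.
--
--     Since buildah does not support the --entrypoint flag, we need to extract it so that
--     the run command can be properly formatted later on.
--
--     :param flags: The flags to treat.
--     :return: The filtered flags and the entrypoint value.
--     """
--     if flags is None:
--         return [], None
--
--     entrypoint_index = next(
--         (i for i, flag in enumerate(flags) if flag.startswith("--entrypoint")), None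
--     )
--
--     if entrypoint_index is None:
--         return flags, None
--
--     entrypoint_flag = flags[entrypoint_index]
--
--     # entrypoint flag is in the format --entrypoint=<entrypoint>
--     if "=" in entrypoint_flag:
--         entrypoint_value = entrypoint_flag.split("=")[1]
--         return flags[:entrypoint_index] + flags[entrypoint_index + 1 :], entrypoint_value
--     # entrypoint flag is in the format --entrypoint <entrypoint>
--     elif entrypoint_index + 1 < len(flags):
--         entrypoint_value = flags[entrypoint_index + 1]
--         return flags[:entrypoint_index] + flags[entrypoint_index + 2 :], entrypoint_value
--     # entrypoint flag exists but no value is provided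
--     else:
--         raise RuntimeError(
--             f"Unable to parse the run command flags: {flags}."
--             "Check if the --entrypoint flag defines a value."
--         )
-- ===== SOURCE B (Python) =====
-- from typing import Optional
--
-- def _filter_entrypoint_flags(
--     flags: Optional[list[str]]
-- ) -> tuple[list[str], Optional[str]]:
--     """One forward pass: copy flags until the first --entrypoint flag, consume it
--     (and its value argument if given separately), then append the untouched tail."""
--     if flags is None:
--         return [], None
--     out: list[str] = []
--     i = 0
--     n = len(flags)
--     while i < n:
--         flag = flags[i]
--         if flag.startswith("--entrypoint"):
--             if "=" in flag:
--                 out.extend(flags[i + 1:])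
--                 return out, flag.split("=")[1]
--             elif i + 1 < n:
--                 value = flags[i + 1]
--                 out.extend(flags[i + 2:])
--                 return out, value
--             else:
--                 raise RuntimeError(
--                     f"Unable to parse the run command flags: {flags}."
--                     "Check if the --entrypoint flag defines a value."
--                 )
--         out.append(flag)
--         i += 1
--     return out, None
-- ===== Notes on version B (the rewrite author's own statement) =====
-- stated objective: alternative
-- what changed: Replaced A's two-phase find-index-then-slice-and-reconcatenate with a single stateful forward pass that copies flags into an output list until the first --entrypoint flag, consumes it (and its separate value if any), and appends the untouched tail.
import Mathlib
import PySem

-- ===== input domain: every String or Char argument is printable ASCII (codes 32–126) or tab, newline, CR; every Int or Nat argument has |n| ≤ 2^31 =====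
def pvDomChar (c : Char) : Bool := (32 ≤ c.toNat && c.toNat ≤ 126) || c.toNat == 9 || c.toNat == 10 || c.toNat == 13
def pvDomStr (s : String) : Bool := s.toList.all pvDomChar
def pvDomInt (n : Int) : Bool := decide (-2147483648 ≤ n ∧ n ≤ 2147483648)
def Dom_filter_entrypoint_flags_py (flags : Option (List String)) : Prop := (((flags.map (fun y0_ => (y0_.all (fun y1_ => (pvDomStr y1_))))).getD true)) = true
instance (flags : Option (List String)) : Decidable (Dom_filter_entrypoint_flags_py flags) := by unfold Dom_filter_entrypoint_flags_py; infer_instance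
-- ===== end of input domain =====

-- B replaces A's find-index-then-slice-and-reconcatenate with one stateful forward
-- pass that copies flags until the first --entrypoint flag, consumes it (and its
-- separate value if any) and appends the untouched tail (objective: alternative).

-- ===== PORT A =====
-- port of: next((i for i, flag in enumerate(flags) if flag.startswith("--entrypoint")), None)
def pvEpPred (flag : String) : Bool := PySem.Str.startswith flag "--entrypoint"

-- port of: flag.split("=")[1]  (only used under the guard '"=" in flag', so index 1 exists)
def pvEpSplitVal (flag : String) : String :=
  ((PySem.Str.split? flag "=").getD []).getD 1 ""

def filter_entrypoint_flags_py (flags : Option (List String)) : List String × Option String :=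
  match flags with
  | none => ([], none)
  | some fs =>
    match fs.findIdx? pvEpPred with
    | none => (fs, none)
    | some i =>
      let entrypoint_flag := fs.getD i ""
      if PySem.Str.isIn "=" entrypoint_flag then
        (PySem.List.slice fs none (some (i : Int)) ++ PySem.List.slice fs (some ((i : Int) + 1)) none,
         some (pvEpSplitVal entrypoint_flag))
      else if i + 1 < fs.length then
        (PySem.List.slice fs none (some (i : Int)) ++ PySem.List.slice fs (some ((i : Int) + 2)) none,
         some (fs.getD (i + 1) ""))
      else
        ([], none)  -- Python raises RuntimeError here; excluded by Pre_

-- ===== PORT B =====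
-- the while loop of Source B: acc is 'out', the list argument is the not-yet-scanned suffix
def pvEpLoop (acc : List String) : List String → List String × Option String
  | [] => (acc, none)
  | flag :: rest =>
    if pvEpPred flag then
      if PySem.Str.isIn "=" flag then
        (acc ++ rest, some (pvEpSplitVal flag))
      else
        match rest with
        | v :: rest' => (acc ++ rest', some v)
        | [] => ([], none)  -- Python raises RuntimeError here; excluded by Pre_
    else pvEpLoop (acc ++ [flag]) rest

def filter_entrypoint_flags_py_alt (flags : Option (List String)) : List String × Option String :=
  match flags with
  | none => ([], none)
  | some fs => pvEpLoop [] fs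

-- ===== PRECONDITION & SPEC =====
-- Pre_ excludes exactly the inputs where both Pythons raise RuntimeError: the first
-- --entrypoint flag is the last element and contains no '='.
def pvPreEpB (flags : Option (List String)) : Bool :=
  match flags with
  | none => true
  | some fs =>
    match fs.findIdx? pvEpPred with
    | none => true
    | some i => PySem.Str.isIn "=" (fs.getD i "") || decide (i + 1 < fs.length)

def Pre_filter_entrypoint_flags_py (flags : Option (List String)) : Prop :=
  pvPreEpB flags = true
instance (flags : Option (List String)) : Decidable (Pre_filter_entrypoint_flags_py flags) := by
  unfold Pre_filter_entrypoint_flags_py; infer_instance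

def pvWitness_filter_entrypoint_flags_py : Option (List String) :=
  some ["-t", "--entrypoint=/bin/sh", "img"]

def Spec_filter_entrypoint_flags_py (flags : Option (List String)) (out : List String × Option String) : Prop := out = filter_entrypoint_flags_py_alt flags
instance (flags : Option (List String)) (out : List String × Option String) : Decidable (Spec_filter_entrypoint_flags_py flags out) := by unfold Spec_filter_entrypoint_flags_py; infer_instance

-- ===== CLAIM (what is proved, stated in full; the proofs are below) =====
def Claim_equal_filter_entrypoint_flags_py : Prop := ∀ (flags : Option (List String)), Dom_filter_entrypoint_flags_py flags → Pre_filter_entrypoint_flags_py flags → Spec_filter_entrypoint_flags_py flags (filter_entrypoint_flags_py flags)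

-- ===== LEMMAS AND PROOFS =====

-- characterisation of B's loop by the position of the first matching flag
theorem pvEpLoop_eq (fs : List String) : ∀ (acc : List String),
    (match fs.findIdx? pvEpPred with
      | none => True
      | some i => PySem.Str.isIn "=" (fs.getD i "") = true ∨ i + 1 < fs.length) →
    pvEpLoop acc fs =
      match fs.findIdx? pvEpPred with
      | none => (acc ++ fs, none)
      | some i =>
        if PySem.Str.isIn "=" (fs.getD i "") then
          (acc ++ fs.take i ++ fs.drop (i + 1), some (pvEpSplitVal (fs.getD i "")))
        else
          (acc ++ fs.take i ++ fs.drop (i + 2), some (fs.getD (i + 1) "")) := by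
  induction fs with
  | nil => intro acc _; simp [pvEpLoop]
  | cons f rest ih =>
    intro acc h
    by_cases hp : pvEpPred f = true
    · have hfi : (f :: rest).findIdx? pvEpPred = some 0 := by
        simp [List.findIdx?_cons, hp]
      rw [hfi] at h ⊢
      simp only [List.getD_cons_zero] at h ⊢
      by_cases he : PySem.Str.isIn "=" f = true
      · simp only [he, if_true]
        simp only [pvEpLoop, hp, if_true, he]
        simp
      · simp only [he, if_false, Bool.false_eq_true]
        simp only [pvEpLoop, hp, if_true, he, Bool.false_eq_true, if_false]
        rcases h with h | h
        · exact absurd h he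
        · cases rest with
          | nil => simp at h
          | cons v rest' => simp
    · cases hfi : rest.findIdx? pvEpPred with
      | none =>
        have hfi' : (f :: rest).findIdx? pvEpPred = none := by
          simp [List.findIdx?_cons, hp, hfi]
        rw [hfi'] at h ⊢
        have := ih (acc ++ [f]) (by rw [hfi]; trivial)
        rw [hfi] at this
        simp only [pvEpLoop, hp, Bool.false_eq_true, if_false]
        rw [this]; simp
      | some j =>
        have hfi' : (f :: rest).findIdx? pvEpPred = some (j + 1) := by
          simp [List.findIdx?_cons, hp, hfi]
        rw [hfi'] at h ⊢
        simp only [List.getD_cons_succ, List.length_cons] at h ⊢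
        have := ih (acc ++ [f]) (by rw [hfi]; rcases h with h | h
                                    · exact Or.inl h
                                    · exact Or.inr (by omega))
        rw [hfi] at this
        simp only [pvEpLoop, hp, Bool.false_eq_true, if_false]
        rw [this]
        by_cases he : PySem.Str.isIn "=" (rest.getD j "") = true
        · simp only [he, if_true, List.take_succ_cons, List.drop_succ_cons]
          simp
        · simp only [he, if_false, Bool.false_eq_true, List.take_succ_cons, List.drop_succ_cons]
          simp

theorem findIdx?_lt_length {α : Type} {p : α → Bool} {xs : List α} {i : ℕ}
    (h : xs.findIdx? p = some i) : i < xs.length :=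
  List.findIdx?_eq_some_iff_findIdx_eq.mp h |>.1

-- ===== VERDICT (by name: the statement is the Claim_ definition above) =====
theorem filter_entrypoint_flags_py_spec : Claim_equal_filter_entrypoint_flags_py := by
  intro flags _ hpre
  unfold Spec_filter_entrypoint_flags_py
  cases flags with
  | none => rfl
  | some fs =>
    simp only [Pre_filter_entrypoint_flags_py, pvPreEpB] at hpre
    simp only [filter_entrypoint_flags_py, filter_entrypoint_flags_py_alt]
    cases hfi : fs.findIdx? pvEpPred with
    | none =>
      rw [hfi] at hpre
      rw [pvEpLoop_eq fs [] (by rw [hfi]; trivial), hfi]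
      simp
    | some i =>
      rw [hfi] at hpre
      have hdisj : PySem.Str.isIn "=" (fs.getD i "") = true ∨ i + 1 < fs.length := by
        rcases Bool.or_eq_true_iff.mp hpre with h | h
        · exact Or.inl h
        · exact Or.inr (of_decide_eq_true h)
      have hlt : i < fs.length := findIdx?_lt_length hfi
      rw [pvEpLoop_eq fs [] (by rw [hfi]; exact hdisj), hfi]
      have h1 : PySem.List.slice fs none (some (i : Int)) = fs.take i :=
        PySem.List.slice_to_natCast fs i
      by_cases he : PySem.Str.isIn "=" (fs.getD i "") = true
      · simp only [he, if_true]
        have h2 : PySem.List.slice fs (some ((i : Int) + 1)) none = fs.drop (i + 1) := by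
          have := PySem.List.slice_from_natCast fs (i + 1)
          simpa using this
        simp [h1, h2]
      · rcases hdisj with hd | hd
        · exact absurd hd he
        · simp only [he, if_false, Bool.false_eq_true, hd, if_true]
          have h2 : PySem.List.slice fs (some ((i : Int) + 2)) none = fs.drop (i + 2) := by
            have := PySem.List.slice_from_natCast fs (i + 2)
            simpa using this
          simp [h1, h2]
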